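-- pv_equiv track=rewrite | github.com/dictionaria/teanu | cldfbench_teanu.py | _convert_before_sn
-- ===== SOURCE A (Python) =====
-- def _convert_before_sn(mapping, entry):
--     found_sn = False
--     for m, v in entry:
--         if found_sn:
--             yield m, v
--         elif m == 'sn':
--             found_sn = True
--             yield m, v
--         else:
--             yield mapping.get(m, m), v
-- ===== SOURCE B (Python) =====
-- def _convert_before_sn(mapping, entry):
--     items = list(entry)
--     idx = next((i for i, (m, _) in enumerate(items) if m == 'sn'), len(items))
--     for m, v in items[:idx]:
--         yield mapping.get(m, m), v
--     for m, v in items[idx:]: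
--         yield m, v
-- ===== Notes on version B (the rewrite author's own statement) =====
-- stated objective: alternative
-- what changed: Replaces the per-item boolean-flag single pass with finding the split index of the first 'sn' key, then remapping the prefix and passing the suffix through unchanged.
import Mathlib
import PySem

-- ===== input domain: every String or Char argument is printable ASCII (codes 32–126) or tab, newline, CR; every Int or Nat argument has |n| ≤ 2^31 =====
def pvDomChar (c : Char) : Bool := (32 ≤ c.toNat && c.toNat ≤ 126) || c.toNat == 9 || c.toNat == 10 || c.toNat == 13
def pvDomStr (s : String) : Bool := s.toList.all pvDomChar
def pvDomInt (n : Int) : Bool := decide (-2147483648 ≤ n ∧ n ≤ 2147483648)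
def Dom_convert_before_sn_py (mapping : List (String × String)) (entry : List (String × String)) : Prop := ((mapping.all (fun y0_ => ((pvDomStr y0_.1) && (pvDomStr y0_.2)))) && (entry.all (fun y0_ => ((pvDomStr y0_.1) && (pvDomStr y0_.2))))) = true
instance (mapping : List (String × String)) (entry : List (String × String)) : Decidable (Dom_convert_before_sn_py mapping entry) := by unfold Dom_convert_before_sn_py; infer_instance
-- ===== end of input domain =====

-- B replaces A's boolean-flag single pass by locating the first 'sn' key and remapping only the prefix (objective: alternative decomposition).

-- ===== PORT A =====
-- the generator loop with its found_sn flag, step for step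
def convertA_go (mapping : List (String × String)) (foundSn : Bool) : List (String × String) → List (String × String)
  | [] => []
  | (m, v) :: rest =>
    if foundSn then (m, v) :: convertA_go mapping true rest
    else if m == "sn" then (m, v) :: convertA_go mapping true rest
    else ((PySem.Dict.ofList mapping).getD m m, v) :: convertA_go mapping false rest

def convert_before_sn_py (mapping : List (String × String)) (entry : List (String × String)) : List (String × String) :=
  convertA_go mapping false entry

-- ===== PORT B =====
def convert_before_sn_py_alt (mapping : List (String × String)) (entry : List (String × String)) : List (String × String) :=
  let idx := entry.findIdx (fun p => p.1 == "sn")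
  (entry.take idx).map (fun p => ((PySem.Dict.ofList mapping).getD p.1 p.1, p.2))
    ++ entry.drop idx

-- ===== PRECONDITION & SPEC =====
def Spec_convert_before_sn_py (mapping : List (String × String)) (entry : List (String × String)) (out : List (String × String)) : Prop := out = convert_before_sn_py_alt mapping entry
instance (mapping : List (String × String)) (entry : List (String × String)) (out : List (String × String)) : Decidable (Spec_convert_before_sn_py mapping entry out) := by unfold Spec_convert_before_sn_py; infer_instance

-- ===== CLAIM (what is proved, stated in full; the proofs are below) =====
def Claim_equal_convert_before_sn_py : Prop := ∀ (mapping : List (String × String)) (entry : List (String × String)), Dom_convert_before_sn_py mapping entry → Spec_convert_before_sn_py mapping entry (convert_before_sn_py mapping entry)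

-- ===== LEMMAS AND PROOFS =====

-- once the flag is set, A copies the rest unchanged
theorem convertA_go_true (mapping : List (String × String)) (l : List (String × String)) :
    convertA_go mapping true l = l := by
  induction l with
  | nil => rfl
  | cons p rest ih => cases p; simp [convertA_go, ih]

theorem convertA_go_false_eq (mapping : List (String × String)) (l : List (String × String)) :
    convertA_go mapping false l =
      (l.take (l.findIdx (fun p => p.1 == "sn"))).map
        (fun p => ((PySem.Dict.ofList mapping).getD p.1 p.1, p.2))
      ++ l.drop (l.findIdx (fun p => p.1 == "sn")) := by
  induction l with
  | nil => rfl
  | cons p rest ih =>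
    obtain ⟨m, v⟩ := p
    by_cases h : m = "sn"
    · subst h
      simp [convertA_go, List.findIdx_cons, convertA_go_true]
    · have hb : ((fun p : String × String => p.1 == "sn") (m, v)) = false := by
        simp [h]
      simp [convertA_go, List.findIdx_cons, hb, ih]

-- ===== VERDICT (by name: the statement is the Claim_ definition above) =====
theorem convert_before_sn_py_spec : Claim_equal_convert_before_sn_py := by
  intro mapping entry _
  unfold Spec_convert_before_sn_py convert_before_sn_py convert_before_sn_py_alt
  exact convertA_go_false_eq mapping entry
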